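-- pv_equiv track=rewrite | github.com/petercheng00/adventOfCode | 2024/day2.py | is_safe2
-- ===== SOURCE A (Python) =====
-- def is_safe(report):
--     for direction in [-1, 1]:
--         failed = False
--         for a, b in zip(report, report[1:]):
--             a *= direction
--             b *= direction
--             if b - a < 1 or b - a > 3:
--                 failed = True
--                 break
--         if not failed:
--             return True
--     return False
--
-- def is_safe2(report):
--     for direction in [-1, 1]:
--         failed = False
--         for i in range(len(report)-1):
--             a = report[i] * direction
--             b = report[i+1] * direction
--             if b - a < 1 or b - a > 3:
--                 report_sub1 = report[:i] + report[i+1:]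
--                 report_sub2 = report[:i+1] + report[i+2:]
--                 failed = not is_safe(report_sub1) and not is_safe(report_sub2)
--                 break
--         if not failed:
--             return True
--     return False
-- ===== SOURCE B (Python) =====
-- def is_safe(report):
--     for direction in [-1, 1]:
--         failed = False
--         for a, b in zip(report, report[1:]):
--             a *= direction
--             b *= direction
--             if b - a < 1 or b - a > 3:
--                 failed = True
--                 break
--         if not failed:
--             return True
--     return False
--
-- def is_safe2(report):
--     if is_safe(report):
--         return True
--     for i in range(len(report)):
--         if is_safe(report[:i] + report[i+1:]):
--             return True
--     return False
-- ===== Notes on version B (the rewrite author's own statement) =====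
-- stated objective: simpler
-- what changed: Replaced A's per-direction scan that finds the first violation and tests only the two candidate deletions by the plain brute-force dampener: safe as-is, or safe after deleting some single index, delegating all direction logic to is_safe.
import Mathlib
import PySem

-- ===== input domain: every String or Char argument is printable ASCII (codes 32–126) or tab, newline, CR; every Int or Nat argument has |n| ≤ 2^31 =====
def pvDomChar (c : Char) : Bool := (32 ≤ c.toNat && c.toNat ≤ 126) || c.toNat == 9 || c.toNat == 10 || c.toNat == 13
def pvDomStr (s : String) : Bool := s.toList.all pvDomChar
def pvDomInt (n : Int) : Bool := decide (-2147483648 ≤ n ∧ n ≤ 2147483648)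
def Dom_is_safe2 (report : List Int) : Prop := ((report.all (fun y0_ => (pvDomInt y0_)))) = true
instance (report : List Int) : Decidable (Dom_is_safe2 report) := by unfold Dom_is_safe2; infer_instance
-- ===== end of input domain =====

-- B replaces A's direction-aware first-violation dampener by the plain brute force
-- "safe as is, or safe after deleting some single index" (objective: simpler).

-- ===== PORT A =====
-- helper is_safe, shared by both Pythons: the inner 'for a, b in zip(report, report[1:])'
-- loop with its break, returning the 'failed' flag; recursion on consecutive pairs is exact.
def is_safe_failed (d : Int) : List Int → Bool
  | a :: b :: rest =>
    if b * d - a * d < 1 || b * d - a * d > 3 then true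
    else is_safe_failed d (b :: rest)
  | _ => false

def is_safe (report : List Int) : Bool :=
  if is_safe_failed (-1) report = false then true
  else if is_safe_failed 1 report = false then true
  else false

-- the 'for i in range(len(report)-1)' loop of A's is_safe2 for one direction, returning 'failed';
-- report[i] is always in range here, so getD is exact; report[:i]+report[i+1:] = take i ++ drop (i+1).
def is_safe2_scan (report : List Int) (d : Int) (i : Nat) : Bool :=
  if _h : i < report.length - 1 then
    -- a = report[i] * direction, b = report[i+1] * direction, inlined
    if report.getD (i + 1) 0 * d - report.getD i 0 * d < 1 ||
        report.getD (i + 1) 0 * d - report.getD i 0 * d > 3 then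
      !(is_safe (report.take i ++ report.drop (i + 1))) &&
        !(is_safe (report.take (i + 1) ++ report.drop (i + 2)))
    else is_safe2_scan report d (i + 1)
  else false
termination_by report.length - i
decreasing_by omega

def is_safe2 (report : List Int) : Bool :=
  if is_safe2_scan report (-1) 0 = false then true
  else if is_safe2_scan report 1 0 = false then true
  else false

-- ===== PORT B =====
-- 'for i in range(len(report)): if is_safe(report[:i] + report[i+1:]): return True'
def is_safe2_brute (report : List Int) (i : Nat) : Bool :=
  if _h : i < report.length then
    if is_safe (report.take i ++ report.drop (i + 1)) then true
    else is_safe2_brute report (i + 1)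
  else false
termination_by report.length - i
decreasing_by omega

def is_safe2_alt (report : List Int) : Bool :=
  if is_safe report then true
  else is_safe2_brute report 0

-- ===== PRECONDITION & SPEC =====
def Spec_is_safe2 (report : List Int) (out : Bool) : Prop := out = is_safe2_alt report
instance (report : List Int) (out : Bool) : Decidable (Spec_is_safe2 report out) := by unfold Spec_is_safe2; infer_instance

-- ===== CLAIM (what is proved, stated in full; the proofs are below) =====
def Claim_equal_is_safe2 : Prop := ∀ (report : List Int), Dom_is_safe2 report → Spec_is_safe2 report (is_safe2 report)

-- ===== LEMMAS AND PROOFS =====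

-- the pair (i, i+1) violates direction d
def badAt (d : Int) (l : List Int) (i : Nat) : Prop :=
  i + 1 < l.length ∧
    (l.getD (i + 1) 0 * d - l.getD i 0 * d < 1 ∨ l.getD (i + 1) 0 * d - l.getD i 0 * d > 3)

def del (l : List Int) (j : Nat) : List Int := l.take j ++ l.drop (j + 1)

theorem badAt_cons (d x : Int) (l : List Int) (i : Nat) :
    badAt d (x :: l) (i + 1) ↔ badAt d l i := by
  simp [badAt]

theorem badAt_cons_zero (d a b : Int) (rest : List Int) :
    badAt d (a :: b :: rest) 0 ↔ (b * d - a * d < 1 ∨ b * d - a * d > 3) := by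
  simp [badAt]

theorem failed_iff (d : Int) : ∀ l : List Int, is_safe_failed d l = true ↔ ∃ i, badAt d l i := by
  intro l
  induction l with
  | nil => simp [is_safe_failed, badAt]
  | cons a t ih =>
    cases t with
    | nil => simp [is_safe_failed, badAt]
    | cons b rest =>
      rw [is_safe_failed]
      split_ifs with h
      · simp only [true_iff]
        exact ⟨0, (badAt_cons_zero d a b rest).mpr (by simpa using h)⟩
      · rw [ih]
        constructor
        · rintro ⟨i, hb⟩; exact ⟨i + 1, (badAt_cons d a (b :: rest) i).mpr hb⟩
        · rintro ⟨i, hb⟩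
          cases i with
          | zero =>
            exact absurd ((badAt_cons_zero d a b rest).mp hb) (by simpa using h)
          | succ n => exact ⟨n, (badAt_cons d a (b :: rest) n).mp hb⟩

theorem is_safe_iff (l : List Int) :
    is_safe l = true ↔ is_safe_failed (-1) l = false ∨ is_safe_failed 1 l = false := by
  unfold is_safe
  split_ifs <;> simp_all

theorem length_del (l : List Int) (j : Nat) (hj : j < l.length) :
    (del l j).length = l.length - 1 := by
  simp [del]; omega

theorem getD_del (l : List Int) (j k : Nat) (hj : j < l.length) :
    (del l j).getD k 0 = if k < j then l.getD k 0 else l.getD (k + 1) 0 := by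
  unfold del
  rcases Nat.lt_or_ge k j with hk | hk
  · rw [if_pos hk, List.getD_eq_getElem?_getD,
      List.getElem?_append_left (by simp; omega),
      List.getElem?_take_of_lt hk, ← List.getD_eq_getElem?_getD]
  · rw [if_neg (by omega), List.getD_eq_getElem?_getD,
      List.getElem?_append_right (by simp; omega), List.getElem?_drop]
    have he : j + 1 + (k - (l.take j).length) = k + 1 := by
      simp [List.length_take]; omega
    rw [he, ← List.getD_eq_getElem?_getD]

theorem badAt_del (d : Int) (l : List Int) (i j : Nat) (hb : badAt d l i) (hj : j < l.length)
    (h1 : j ≠ i) (h2 : j ≠ i + 1) : badAt d (del l j) (if j < i then i - 1 else i) := by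
  obtain ⟨hlen, hv⟩ := hb
  rcases Nat.lt_or_ge j i with hji | hji
  · rw [if_pos hji]
    refine ⟨by rw [length_del l j hj]; omega, ?_⟩
    rw [getD_del l j (i - 1) hj, getD_del l j (i - 1 + 1) hj,
      if_neg (by omega), if_neg (by omega)]
    have e1 : i - 1 + 1 = i := by omega
    rw [e1]; exact hv
  · rw [if_neg (by omega)]
    have hji' : i + 1 < j := by omega
    refine ⟨by rw [length_del l j hj]; omega, ?_⟩
    rw [getD_del l j i hj, getD_del l j (i + 1) hj, if_pos (by omega), if_pos (by omega)]
    exact hv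

theorem badAt_of_scan_cond (d : Int) (l : List Int) (i : Nat) (h1 : i < l.length - 1)
    (h2 : l.getD (i + 1) 0 * d - l.getD i 0 * d < 1 ∨ l.getD (i + 1) 0 * d - l.getD i 0 * d > 3) :
    badAt d l i := ⟨by omega, h2⟩

theorem scan_false_of_all (d : Int) (l : List Int) :
    ∀ n i, l.length - i ≤ n → (∀ k, i ≤ k → ¬ badAt d l k) → is_safe2_scan l d i = false := by
  intro n
  induction n with
  | zero => intro i hle h; rw [is_safe2_scan, dif_neg (by omega)]
  | succ n ih =>
    intro i hle h
    rw [is_safe2_scan]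
    split_ifs with h1 h2
    · exact absurd (badAt_of_scan_cond d l i h1 (by simpa using h2)) (h i le_rfl)
    · exact ih (i + 1) (by omega) (fun k hk => h k (by omega))
    · rfl

theorem scan_false_of_good_del (d : Int) (l : List Int) (j : Nat) (hj : j < l.length)
    (hgood : ∀ k, ¬ badAt d (del l j) k) (hsafe : is_safe (del l j) = true) :
    ∀ n i, l.length - i ≤ n → is_safe2_scan l d i = false := by
  intro n
  induction n with
  | zero => intro i hle; rw [is_safe2_scan, dif_neg (by omega)]
  | succ n ih =>
    intro i hle
    rw [is_safe2_scan]
    split_ifs with h1 h2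
    · have hb : badAt d l i := badAt_of_scan_cond d l i h1 (by simpa using h2)
      have hji : j = i ∨ j = i + 1 := by
        by_contra hc
        push Not at hc
        exact hgood _ (badAt_del d l i j hb hj hc.1 hc.2)
      rcases hji with rfl | rfl
      · have : is_safe (l.take j ++ l.drop (j + 1)) = true := hsafe
        simp [this]
      · have : is_safe (l.take (i + 1) ++ l.drop (i + 2)) = true := hsafe
        simp [this]
    · exact ih (i + 1) (by omega)
    · rfl

theorem scan_false_spec (d : Int) (l : List Int) :
    ∀ n i, l.length - i ≤ n → is_safe2_scan l d i = false →
      (∀ k, i ≤ k → ¬ badAt d l k) ∨ ∃ j, j < l.length ∧ is_safe (del l j) = true := by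
  intro n
  induction n with
  | zero =>
    intro i hle _
    left
    intro k hk hb
    exact absurd hb.1 (by omega)
  | succ n ih =>
    intro i hle hs
    rw [is_safe2_scan] at hs
    by_cases h1 : i < l.length - 1
    · rw [dif_pos h1] at hs
      by_cases h2 : (l.getD (i+1) 0 * d - l.getD i 0 * d < 1 ∨ l.getD (i+1) 0 * d - l.getD i 0 * d > 3)
      · rw [if_pos (by simpa using h2)] at hs
        right
        by_cases hA : is_safe (l.take i ++ l.drop (i + 1)) = true
        · exact ⟨i, by omega, hA⟩
        · refine ⟨i + 1, by omega, ?_⟩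
          have himp : is_safe (l.take i ++ l.drop (i + 1)) = false →
              is_safe (l.take (i + 1) ++ l.drop (i + 2)) = true := by simpa using hs
          exact himp (by simpa using hA)
      · rw [if_neg (by simpa using h2)] at hs
        rcases ih (i + 1) (by omega) hs with hall | hex
        · left
          intro k hk hb
          rcases Nat.eq_or_lt_of_le hk with rfl | hk'
          · exact h2 hb.2
          · exact hall k (by omega) hb
        · exact Or.inr hex
    · left
      intro k hk hb
      exact absurd hb.1 (by omega)

theorem brute_iff (l : List Int) :
    ∀ n i, l.length - i ≤ n →
      (is_safe2_brute l i = true ↔ ∃ j, i ≤ j ∧ j < l.length ∧ is_safe (del l j) = true) := by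
  intro n
  induction n with
  | zero =>
    intro i hle
    rw [is_safe2_brute, dif_neg (by omega)]
    simp only [Bool.false_eq_true, false_iff]
    rintro ⟨j, hj1, hj2, _⟩
    omega
  | succ n ih =>
    intro i hle
    rw [is_safe2_brute]
    split_ifs with h1 h2
    · simp only [true_iff]
      exact ⟨i, le_rfl, h1, h2⟩
    · rw [ih (i + 1) (by omega)]
      constructor
      · rintro ⟨j, hj1, hj2, hj3⟩; exact ⟨j, by omega, hj2, hj3⟩
      · rintro ⟨j, hj1, hj2, hj3⟩
        rcases Nat.eq_or_lt_of_le hj1 with rfl | hj'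
        · exact absurd hj3 h2
        · exact ⟨j, by omega, hj2, hj3⟩
    · simp only [false_iff]
      rintro ⟨j, hj1, hj2, _⟩
      omega

theorem no_bad_of_failed_false (d : Int) (l : List Int) (h : is_safe_failed d l = false) :
    ∀ k, ¬ badAt d l k := by
  intro k hb
  have := (failed_iff d l).mpr ⟨k, hb⟩
  simp [this] at h

theorem is_safe2_true_of_scan (l : List Int)
    (h : is_safe2_scan l (-1) 0 = false ∨ is_safe2_scan l 1 0 = false) :
    is_safe2 l = true := by
  unfold is_safe2
  rcases h with h | h <;> split_ifs <;> simp_all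

theorem main_iff (l : List Int) : is_safe2 l = true ↔ is_safe2_alt l = true := by
  constructor
  · intro h
    have hd : is_safe2_scan l (-1) 0 = false ∨ is_safe2_scan l 1 0 = false := by
      unfold is_safe2 at h
      split_ifs at h with h1 h2
      · exact Or.inl h1
      · exact Or.inr h2
    have key : is_safe l = true ∨ ∃ j, j < l.length ∧ is_safe (del l j) = true := by
      rcases hd with h' | h'
      all_goals rcases scan_false_spec _ l l.length 0 (by omega) h' with hall | hex
      · left
        rw [is_safe_iff]
        left
        rw [← Bool.not_eq_true]
        rw [failed_iff]
        push Not
        exact fun i => hall i (Nat.zero_le i)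
      · exact Or.inr hex
      · left
        rw [is_safe_iff]
        right
        rw [← Bool.not_eq_true]
        rw [failed_iff]
        push Not
        exact fun i => hall i (Nat.zero_le i)
      · exact Or.inr hex
    unfold is_safe2_alt
    rcases key with hk | ⟨j, hj, hk⟩
    · rw [if_pos hk]
    · split_ifs with h0
      · rfl
      · rw [brute_iff l l.length 0 (by omega)]
        exact ⟨j, Nat.zero_le j, hj, hk⟩
  · intro h
    unfold is_safe2_alt at h
    split_ifs at h with h0
    · rcases (is_safe_iff l).mp h0 with hf | hf
      all_goals
        apply is_safe2_true_of_scan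
      · exact Or.inl (scan_false_of_all (-1) l l.length 0 (by omega)
          (fun k _ => no_bad_of_failed_false (-1) l hf k))
      · exact Or.inr (scan_false_of_all 1 l l.length 0 (by omega)
          (fun k _ => no_bad_of_failed_false 1 l hf k))
    · obtain ⟨j, _, hj, hsafe⟩ := (brute_iff l l.length 0 (by omega)).mp h
      rcases (is_safe_iff (del l j)).mp hsafe with hf | hf
      · exact is_safe2_true_of_scan l (Or.inl
          (scan_false_of_good_del (-1) l j hj (no_bad_of_failed_false _ _ hf) hsafe
            l.length 0 (by omega)))
      · exact is_safe2_true_of_scan l (Or.inr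
          (scan_false_of_good_del 1 l j hj (no_bad_of_failed_false _ _ hf) hsafe
            l.length 0 (by omega)))

-- ===== VERDICT (by name: the statement is the Claim_ definition above) =====
theorem is_safe2_spec : Claim_equal_is_safe2 := by
  intro report _
  unfold Spec_is_safe2
  have := main_iff report
  cases h1 : is_safe2 report <;> cases h2 : is_safe2_alt report <;> simp_all
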